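-- pv_equiv track=rewrite | github.com/kishorereddy2907/aws-free-tier-etl | lambdas/validation/handler.py | split_duplicates
-- ===== SOURCE A (Python) =====
-- def split_duplicates(rows, email_index):
--     seen_emails = set()
--     good = []
--     bad = []
--
--     for row in rows:
--         email = row[email_index].strip().lower()
--
--         if not email:
--             bad.append(row)
--             continue
--
--         if email in seen_emails:
--             bad.append(row)
--         else:
--             seen_emails.add(email)
--             good.append(row)
--
--     return good, bad
-- ===== SOURCE B (Python) =====
-- def split_duplicates(rows, email_index):
--     # Pass 1: index table mapping each normalized nonempty email to its first occurrence index.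
--     first_seen = {}
--     for i, row in enumerate(rows):
--         email = row[email_index].strip().lower()
--         if email and email not in first_seen:
--             first_seen[email] = i
--     # Pass 2: a row is good iff its email is nonempty and this is its first occurrence.
--     good = []
--     bad = []
--     for i, row in enumerate(rows):
--         email = row[email_index].strip().lower()
--         if email and first_seen[email] == i:
--             good.append(row)
--         else:
--             bad.append(row)
--     return good, bad
-- ===== Notes on version B (the rewrite author's own statement) =====
-- stated objective: alternative
-- what changed: A's single pass with an incrementally grown seen-set is replaced by a two-pass decomposition: pass 1 builds a first_seen dict mapping each normalized nonempty email to its first occurrence index, pass 2 classifies each row as good iff its index equals the recorded first occurrence.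
import Mathlib
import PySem

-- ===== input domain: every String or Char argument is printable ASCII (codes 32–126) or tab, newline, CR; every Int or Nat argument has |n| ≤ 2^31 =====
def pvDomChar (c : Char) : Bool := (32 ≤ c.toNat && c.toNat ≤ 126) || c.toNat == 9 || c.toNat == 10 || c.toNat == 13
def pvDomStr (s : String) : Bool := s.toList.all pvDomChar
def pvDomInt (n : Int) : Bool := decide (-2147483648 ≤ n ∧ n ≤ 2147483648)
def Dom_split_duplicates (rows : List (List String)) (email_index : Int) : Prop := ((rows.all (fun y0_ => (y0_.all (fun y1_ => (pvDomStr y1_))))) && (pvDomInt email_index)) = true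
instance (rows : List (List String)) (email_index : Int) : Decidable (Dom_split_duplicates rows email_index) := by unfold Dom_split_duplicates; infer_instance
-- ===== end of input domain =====

-- B replaces A's single pass with an incrementally grown 'seen' set by a two-pass decomposition:
-- first build a first-occurrence index table, then classify each row by comparing its index with the
-- table (objective: alternative; same cost).

-- ===== PORT A =====
-- A: one pass, a growing 'seen' set; row -> bad if email empty or already seen, else seen.add + good.
def split_duplicates (rows : List (List String)) (email_index : Int) : List (List String) × List (List String) :=
  let st := rows.foldl
    (fun (st : PySem.Set String × List (List String) × List (List String)) row =>
      match PySem.List.pyGet? row email_index with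
      | none => (st.1, st.2.1, st.2.2 ++ [row])   -- Python raises IndexError here; excluded by Pre_
      | some s =>
        let email := PySem.Str.lower (PySem.Str.strip s)
        if email = "" then (st.1, st.2.1, st.2.2 ++ [row])
        else if PySem.Set.contains st.1 email then (st.1, st.2.1, st.2.2 ++ [row])
        else (PySem.Set.add st.1 email, st.2.1 ++ [row], st.2.2))
    (PySem.Set.empty, ([], []))
  (st.2.1, st.2.2)

-- ===== PORT B =====
-- B pass 1: first_seen[email] = index of first occurrence of each nonempty normalized email.
def split_duplicates_alt_firstSeen (rows : List (List String)) (email_index : Int) : PySem.Dict String Int :=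
  (PySem.List.enumerate rows 0).foldl
    (fun (d : PySem.Dict String Int) p =>
      match PySem.List.pyGet? p.2 email_index with
      | none => d   -- Python raises IndexError here; excluded by Pre_
      | some s =>
        let email := PySem.Str.lower (PySem.Str.strip s)
        if email ≠ "" ∧ d.contains email = false then d.insert email p.1 else d)
    PySem.Dict.empty

-- B pass 2: a row is good iff its email is nonempty and this index is the recorded first occurrence.
def split_duplicates_alt (rows : List (List String)) (email_index : Int) : List (List String) × List (List String) :=
  let first_seen := split_duplicates_alt_firstSeen rows email_index
  (PySem.List.enumerate rows 0).foldl
    (fun (gb : List (List String) × List (List String)) p =>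
      match PySem.List.pyGet? p.2 email_index with
      | none => (gb.1, gb.2 ++ [p.2])   -- Python raises IndexError here; excluded by Pre_
      | some s =>
        let email := PySem.Str.lower (PySem.Str.strip s)
        if email ≠ "" ∧ first_seen.get? email = some p.1 then (gb.1 ++ [p.2], gb.2)
        else (gb.1, gb.2 ++ [p.2]))
    ([], [])

-- ===== PRECONDITION & SPEC =====
-- Pre_: every row can be indexed by email_index (otherwise the Python raises IndexError).
def Pre_split_duplicates (rows : List (List String)) (email_index : Int) : Prop :=
  ∀ row ∈ rows, PySem.Raise.InRange row.length email_index
instance (rows : List (List String)) (email_index : Int) : Decidable (Pre_split_duplicates rows email_index) := by unfold Pre_split_duplicates; infer_instance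

def pvWitness_split_duplicates : List (List String) × Int :=
  ([["x", " A@x.com "], ["y", "a@X.com"], ["z", "  "]], -1)

def Spec_split_duplicates (rows : List (List String)) (email_index : Int) (out : List (List String) × List (List String)) : Prop := out = split_duplicates_alt rows email_index
instance (rows : List (List String)) (email_index : Int) (out : List (List String) × List (List String)) : Decidable (Spec_split_duplicates rows email_index out) := by unfold Spec_split_duplicates; infer_instance

-- ===== CLAIM (what is proved, stated in full; the proofs are below) =====
def Claim_equal_split_duplicates : Prop := ∀ (rows : List (List String)) (email_index : Int), Dom_split_duplicates rows email_index → Pre_split_duplicates rows email_index → Spec_split_duplicates rows email_index (split_duplicates rows email_index)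

-- ===== LEMMAS AND PROOFS =====

-- the normalized email of a row ("" also where indexing fails; both ports treat that case like "")
def emOf (idx : Int) (row : List String) : String :=
  match PySem.List.pyGet? row idx with
  | none => ""
  | some s => PySem.Str.lower (PySem.Str.strip s)

-- clean forms of the three loop bodies, factored through emOf
def fA (idx : Int) (st : PySem.Set String × List (List String) × List (List String)) (row : List String) :
    PySem.Set String × List (List String) × List (List String) :=
  if emOf idx row = "" then (st.1, st.2.1, st.2.2 ++ [row])
  else if PySem.Set.contains st.1 (emOf idx row) then (st.1, st.2.1, st.2.2 ++ [row])
  else (PySem.Set.add st.1 (emOf idx row), st.2.1 ++ [row], st.2.2)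

def f1 (idx : Int) (d : PySem.Dict String Int) (p : Int × List String) : PySem.Dict String Int :=
  if emOf idx p.2 ≠ "" ∧ d.contains (emOf idx p.2) = false then d.insert (emOf idx p.2) p.1 else d

def f2 (idx : Int) (d : PySem.Dict String Int)
    (gb : List (List String) × List (List String)) (p : Int × List String) :
    List (List String) × List (List String) :=
  if emOf idx p.2 ≠ "" ∧ d.get? (emOf idx p.2) = some p.1 then (gb.1 ++ [p.2], gb.2)
  else (gb.1, gb.2 ++ [p.2])

def AS (idx : Int) (rows : List (List String)) : PySem.Set String × List (List String) × List (List String) :=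
  rows.foldl (fA idx) (PySem.Set.empty, ([], []))

def FS (idx : Int) (rows : List (List String)) : PySem.Dict String Int :=
  (PySem.List.enumerate rows 0).foldl (f1 idx) PySem.Dict.empty

lemma stepA_eq (idx : Int) (st : PySem.Set String × List (List String) × List (List String)) (row : List String) :
    (match PySem.List.pyGet? row idx with
      | none => (st.1, st.2.1, st.2.2 ++ [row])
      | some s =>
        let email := PySem.Str.lower (PySem.Str.strip s)
        if email = "" then (st.1, st.2.1, st.2.2 ++ [row])
        else if PySem.Set.contains st.1 email then (st.1, st.2.1, st.2.2 ++ [row])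
        else (PySem.Set.add st.1 email, st.2.1 ++ [row], st.2.2))
    = fA idx st row := by
  unfold fA emOf
  cases PySem.List.pyGet? row idx <;> simp

lemma split_duplicates_eq_AS (rows : List (List String)) (idx : Int) :
    split_duplicates rows idx = ((AS idx rows).2.1, (AS idx rows).2.2) := by
  have h : rows.foldl
      (fun (st : PySem.Set String × List (List String) × List (List String)) row =>
        match PySem.List.pyGet? row idx with
        | none => (st.1, st.2.1, st.2.2 ++ [row])
        | some s =>
          let email := PySem.Str.lower (PySem.Str.strip s)
          if email = "" then (st.1, st.2.1, st.2.2 ++ [row])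
          else if PySem.Set.contains st.1 email then (st.1, st.2.1, st.2.2 ++ [row])
          else (PySem.Set.add st.1 email, st.2.1 ++ [row], st.2.2))
      (PySem.Set.empty, ([], [])) = AS idx rows :=
    PySem.List.foldl_congr_mem _ _ _ _ (fun acc x _ => stepA_eq idx acc x)
  unfold split_duplicates
  rw [h]

lemma step1_eq (idx : Int) (d : PySem.Dict String Int) (p : Int × List String) :
    (match PySem.List.pyGet? p.2 idx with
      | none => d
      | some s =>
        let email := PySem.Str.lower (PySem.Str.strip s)
        if email ≠ "" ∧ d.contains email = false then d.insert email p.1 else d)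
    = f1 idx d p := by
  unfold f1 emOf
  cases PySem.List.pyGet? p.2 idx <;> simp

lemma firstSeen_eq_FS (rows : List (List String)) (idx : Int) :
    split_duplicates_alt_firstSeen rows idx = FS idx rows := by
  unfold split_duplicates_alt_firstSeen FS
  exact PySem.List.foldl_congr_mem _ _ _ _ (fun acc x _ => step1_eq idx acc x)

lemma step2_eq (idx : Int) (d : PySem.Dict String Int)
    (gb : List (List String) × List (List String)) (p : Int × List String) :
    (match PySem.List.pyGet? p.2 idx with
      | none => (gb.1, gb.2 ++ [p.2])
      | some s =>
        let email := PySem.Str.lower (PySem.Str.strip s)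
        if email ≠ "" ∧ d.get? email = some p.1 then (gb.1 ++ [p.2], gb.2)
        else (gb.1, gb.2 ++ [p.2]))
    = f2 idx d gb p := by
  unfold f2 emOf
  cases PySem.List.pyGet? p.2 idx <;> simp

lemma alt_eq_clean (rows : List (List String)) (idx : Int) :
    split_duplicates_alt rows idx
      = (PySem.List.enumerate rows 0).foldl (f2 idx (FS idx rows)) ([], []) := by
  unfold split_duplicates_alt
  rw [firstSeen_eq_FS]
  exact PySem.List.foldl_congr_mem _ _ _ _ (fun acc x _ => step2_eq idx (FS idx rows) acc x)

lemma AS_append (idx : Int) (rows : List (List String)) (r : List String) :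
    AS idx (rows ++ [r]) = fA idx (AS idx rows) r := by
  unfold AS
  rw [List.foldl_append]
  rfl

lemma FS_append (idx : Int) (rows : List (List String)) (r : List String) :
    FS idx (rows ++ [r]) = f1 idx (FS idx rows) ((rows.length : Int), r) := by
  unfold FS
  rw [PySem.List.enumerate_append, List.foldl_append]
  simp [PySem.List.enumerate]

-- characterization of FS: which keys it has, and all stored indices are < rows.length
lemma FS_spec (idx : Int) (rows : List (List String)) :
    (∀ e : String, (FS idx rows).contains e = true ↔ (e ≠ "" ∧ e ∈ rows.map (emOf idx))) ∧
    (∀ e j, (FS idx rows).get? e = some j → 0 ≤ j ∧ j < (rows.length : Int)) := by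
  induction rows using List.reverseRecOn with
  | nil =>
    refine ⟨fun e => ?_, fun e j h => ?_⟩
    · simp [FS, PySem.List.enumerate]
    · simp [FS, PySem.List.enumerate, PySem.Dict.get?_empty] at h
  | append_singleton rows r ih =>
    obtain ⟨ihc, ihb⟩ := ih
    rw [FS_append]
    unfold f1
    by_cases hc : emOf idx r ≠ "" ∧ (FS idx rows).contains (emOf idx r) = false
    · rw [if_pos hc]
      refine ⟨fun e => ?_, fun e j h => ?_⟩
      · rw [PySem.Dict.contains_insert, List.map_append]
        have h1 : e = emOf idx r → e ≠ "" := fun h => h ▸ hc.1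
        have h2 : (e == emOf idx r) = true ↔ e = emOf idx r := by simp
        rw [Bool.or_eq_true_iff, h2, ihc e]
        simp only [List.mem_append, List.map_cons, List.map_nil, List.mem_singleton]
        tauto
      · rw [PySem.Dict.get?_insert] at h
        simp only [List.length_append, List.length_cons, List.length_nil]
        split_ifs at h with he
        · have : (rows.length : Int) = j := by simpa using h
          push_cast
          omega
        · have := ihb e j h
          push_cast
          omega
    · rw [if_neg hc]
      refine ⟨fun e => ?_, fun e j h => ?_⟩
      · rw [ihc e, List.map_append]
        have h1 : e ≠ "" → e = emOf idx r → e ∈ rows.map (emOf idx) := by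
          intro hne he
          have hct : (FS idx rows).contains (emOf idx r) = true := by
            rcases Bool.eq_false_or_eq_true ((FS idx rows).contains (emOf idx r)) with ht | hf
            · exact ht
            · exact absurd ⟨he ▸ hne, hf⟩ hc
          rw [he]
          exact ((ihc _).mp hct).2
        simp only [List.mem_append, List.map_cons, List.map_nil, List.mem_singleton]
        tauto
      · have := ihb e j h
        simp only [List.length_append, List.length_cons, List.length_nil]
        push_cast
        omega

-- the 'seen' set of A after processing rows holds exactly the nonempty normalized emails of rows
lemma AS_seen (idx : Int) (rows : List (List String)) :
    ∀ e : String, e ∈ (AS idx rows).1 ↔ (e ≠ "" ∧ e ∈ rows.map (emOf idx)) := by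
  induction rows using List.reverseRecOn with
  | nil => intro e; simp [AS, PySem.Set.empty]
  | append_singleton rows r ih =>
    intro e
    rw [AS_append]
    unfold fA
    have hmap : (rows ++ [r]).map (emOf idx) = rows.map (emOf idx) ++ [emOf idx r] := by
      simp
    by_cases h0 : emOf idx r = ""
    · rw [if_pos h0]
      rw [ih e, hmap]
      have h1 : e = emOf idx r → e = "" := fun h => h ▸ h0
      simp only [List.mem_append, List.mem_singleton]
      tauto
    · rw [if_neg h0]
      by_cases hs : PySem.Set.contains (AS idx rows).1 (emOf idx r) = true
      · rw [if_pos hs]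
        have hmem : emOf idx r ∈ rows.map (emOf idx) := by
          have : emOf idx r ∈ (AS idx rows).1 := by
            simpa [PySem.Set.contains] using hs
          exact (ih _).mp this |>.2
        rw [ih e, hmap]
        have h1 : e = emOf idx r → e ∈ rows.map (emOf idx) := fun h => h ▸ hmem
        simp only [List.mem_append, List.mem_singleton]
        tauto
      · rw [if_neg hs]
        rw [PySem.Set.mem_add, ih e, hmap]
        have h1 : e = emOf idx r → e ≠ "" := fun h => h ▸ h0
        simp only [List.mem_append, List.mem_singleton]
        tauto

-- the main invariant: A's (good, bad) equals B's two-pass classification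
lemma main_eq (idx : Int) (rows : List (List String)) :
    ((AS idx rows).2.1, (AS idx rows).2.2) = split_duplicates_alt rows idx := by
  induction rows using List.reverseRecOn with
  | nil => simp [AS, split_duplicates_alt, split_duplicates_alt_firstSeen, PySem.List.enumerate]
  | append_singleton rows r ih =>
    rw [alt_eq_clean] at ih ⊢
    rw [AS_append]
    rw [show PySem.List.enumerate (rows ++ [r]) 0
          = PySem.List.enumerate rows 0 ++ [((rows.length : Int), r)] by
        rw [PySem.List.enumerate_append]; simp [PySem.List.enumerate]]
    rw [List.foldl_append]
    obtain ⟨FSc, FSb⟩ := FS_spec idx rows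
    -- pass 2 over the old rows is unchanged by extending the table with the new row
    have hcongr : (PySem.List.enumerate rows 0).foldl (f2 idx (FS idx (rows ++ [r]))) ([], [])
        = (PySem.List.enumerate rows 0).foldl (f2 idx (FS idx rows)) ([], []) := by
      apply PySem.List.foldl_congr_mem
      intro acc p hp
      have hp2 : p.2 ∈ rows := by
        have h := List.mem_map_of_mem (f := fun q : Int × List String => q.2) hp
        rwa [PySem.List.map_snd_enumerate] at h
      unfold f2
      by_cases h0 : emOf idx p.2 = ""
      · rw [if_neg (by simp [h0]), if_neg (by simp [h0])]
      · have hget : (FS idx (rows ++ [r])).get? (emOf idx p.2) = (FS idx rows).get? (emOf idx p.2) := by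
          rw [FS_append]
          unfold f1
          by_cases hc : emOf idx r ≠ "" ∧ (FS idx rows).contains (emOf idx r) = false
          · rw [if_pos hc]
            have hmem : emOf idx p.2 ∈ rows.map (emOf idx) := List.mem_map_of_mem hp2
            have hct : (FS idx rows).contains (emOf idx p.2) = true := (FSc _).mpr ⟨h0, hmem⟩
            have hne : emOf idx p.2 ≠ emOf idx r := by
              intro he
              rw [he] at hct
              rw [hc.2] at hct
              exact absurd hct (by simp)
            rw [PySem.Dict.get?_insert]
            rw [if_neg hne]
          · rw [if_neg hc]
        rw [hget]
    rw [hcongr, ← ih]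
    -- now compare the step on the new row r
    set st := AS idx rows with hst
    simp only [List.foldl_cons, List.foldl_nil]
    unfold fA f2
    by_cases h0 : emOf idx r = ""
    · rw [if_pos h0, if_neg (by simp [h0])]
    · rw [if_neg h0]
      by_cases hs : PySem.Set.contains st.1 (emOf idx r) = true
      · rw [if_pos hs]
        have hmem : emOf idx r ∈ rows.map (emOf idx) := by
          have : emOf idx r ∈ st.1 := by simpa [PySem.Set.contains] using hs
          exact ((AS_seen idx rows _).mp this).2
        have hct : (FS idx rows).contains (emOf idx r) = true := (FSc _).mpr ⟨h0, hmem⟩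
        have hFS' : FS idx (rows ++ [r]) = FS idx rows := by
          rw [FS_append]
          unfold f1
          rw [if_neg (by simp [hct])]
        obtain ⟨j, hj⟩ : ∃ j, (FS idx rows).get? (emOf idx r) = some j := by
          have := PySem.Dict.contains_eq_isSome_get? (FS idx rows) (emOf idx r)
          rw [hct] at this
          cases hg : (FS idx rows).get? (emOf idx r) with
          | none => rw [hg] at this; simp at this
          | some j => exact ⟨j, rfl⟩
        have hjb := FSb _ _ hj
        rw [if_neg]
        intro hcond
        rw [hFS', hj] at hcond
        have : j = (rows.length : Int) := by simpa using hcond.2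
        omega
      · rw [if_neg hs]
        have hnm : ¬ (emOf idx r ∈ rows.map (emOf idx)) := by
          intro hmem
          apply hs
          have : emOf idx r ∈ st.1 := (AS_seen idx rows _).mpr ⟨h0, hmem⟩
          simpa [PySem.Set.contains] using this
        have hcf : (FS idx rows).contains (emOf idx r) = false := by
          rcases Bool.eq_false_or_eq_true ((FS idx rows).contains (emOf idx r)) with ht | hf
          · exact absurd ((FSc _).mp ht).2 hnm
          · exact hf
        have hFS' : FS idx (rows ++ [r]) = (FS idx rows).insert (emOf idx r) (rows.length : Int) := by
          rw [FS_append]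
          unfold f1
          rw [if_pos ⟨h0, hcf⟩]
        rw [if_pos]
        refine ⟨h0, ?_⟩
        rw [hFS', PySem.Dict.get?_insert_self]

-- ===== VERDICT (by name: the statement is the Claim_ definition above) =====
theorem split_duplicates_spec : Claim_equal_split_duplicates := by
  intro rows email_index _ _
  unfold Spec_split_duplicates
  rw [split_duplicates_eq_AS]
  exact main_eq email_index rows
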